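-- pv_equiv track=rewrite | github.com/cateiru/Auto-C-Execution | autoce/create.py | _determine_image_size
-- ===== SOURCE A (Python) =====
-- from typing import Tuple
--
-- def _determine_image_size(output_log: str) -> Tuple[int, int]:
--     """
--     Get the size of the output character to determine the size of the image to be created.
--
--     Args:
--         output_log (str): Log of executing `.c`.
--
--     Returns:
--         Tuple[int, int]: The number of line breaks and the maximum number of characters when a line break occurs.
--     """
--
--     line_break = output_log.count('\n')
--     if line_break == 0:
--         return 0, len(output_log)
--
--     line_count = 0
--     max_line = 0
--     for element in output_log:
--         if element == '\n':
--             max_line = max(max_line, line_count)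
--             line_count = 0
--             continue
--         line_count += 1
--
--     return line_break, max_line
-- ===== SOURCE B (Python) =====
-- from typing import Tuple
--
-- def _determine_image_size(output_log: str) -> Tuple[int, int]:
--     """Newline positions + adjacent-gap differences instead of a running-counter scan."""
--     idxs = [i for i, c in enumerate(output_log) if c == '\n']
--     if not idxs:
--         return 0, len(output_log)
--     widths = [j - i - 1 for i, j in zip([-1] + idxs[:-1], idxs)]
--     return len(idxs), max(widths)
-- ===== Notes on version B (the rewrite author's own statement) =====
-- stated objective: alternative
-- what changed: Replaces the per-character running-counter/accumulator scan with collecting the newline positions via enumerate and taking the maximum of the differences of adjacent positions (minus one), the trailing segment dropping out automatically.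
import Mathlib
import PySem

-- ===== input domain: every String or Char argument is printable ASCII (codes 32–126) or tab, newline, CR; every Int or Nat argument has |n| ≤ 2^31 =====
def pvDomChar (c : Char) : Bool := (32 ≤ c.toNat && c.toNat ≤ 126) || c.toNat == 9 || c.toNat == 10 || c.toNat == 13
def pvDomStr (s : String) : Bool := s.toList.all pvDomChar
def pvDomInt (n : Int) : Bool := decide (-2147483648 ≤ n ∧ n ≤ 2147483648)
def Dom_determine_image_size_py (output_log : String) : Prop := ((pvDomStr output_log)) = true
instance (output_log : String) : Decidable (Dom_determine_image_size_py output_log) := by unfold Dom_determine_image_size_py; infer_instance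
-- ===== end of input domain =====

-- B replaces the character-by-character running-counter scan with newline positions (enumerate+filter) and adjacent-position differences; objective: alternative (same O(n) cost).
-- ===== PORT A =====
-- A-side helper: the body of A's for-loop (state = (line_count, max_line))
def pvStepA (st : Int × Int) (element : Char) : Int × Int :=
  if element = '\n' then (0, max st.2 st.1) else (st.1 + 1, st.2)

def determine_image_size_py (output_log : String) : Int × Int :=
  let line_break : Nat := PySem.Str.count output_log "\n"
  if line_break = 0 then
    (0, PySem.Str.len output_log)
  else
    let r := output_log.toList.foldl pvStepA (0, 0)
    ((line_break : Int), r.2)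

-- ===== PORT B =====
-- B-side helper: the comprehension [i for i, c in enumerate(output_log) if c == '\n']
def pvIdxs (cs : List Char) (s : Int) : List Int :=
  ((PySem.List.enumerate cs s).filter (fun p => p.2 == '\n')).map (·.1)

def determine_image_size_py_alt (output_log : String) : Int × Int :=
  let idxs : List Int := pvIdxs output_log.toList 0
  if idxs = [] then
    (0, PySem.Str.len output_log)
  else
    let widths : List Int :=
      (((-1 : Int) :: PySem.List.slice idxs none (some (-1))).zip idxs).map
        (fun p => p.2 - p.1 - 1)
    -- max(widths): widths is nonempty here (idxs ≠ []), so the .getD default is unreachable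
    ((idxs.length : Int), (PySem.List.max? widths (fun y => y)).getD 0)

-- ===== PRECONDITION & SPEC =====
def Spec_determine_image_size_py (output_log : String) (out : Int × Int) : Prop := out = determine_image_size_py_alt output_log
instance (output_log : String) (out : Int × Int) : Decidable (Spec_determine_image_size_py output_log out) := by unfold Spec_determine_image_size_py; infer_instance

-- ===== CLAIM =====
def Claim_equal_determine_image_size_py : Prop := ∀ (output_log : String), Dom_determine_image_size_py output_log → Spec_determine_image_size_py output_log (determine_image_size_py output_log)


-- ===== LEMMAS AND PROOFS =====

-- gaps between consecutive newline positions (prev position p): the line widths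
def pvW (p : Int) : List Int → List Int
  | [] => []
  | j :: r => (j - p - 1) :: pvW j r

theorem pvIdxs_nil (s : Int) : pvIdxs [] s = [] := rfl

theorem pvIdxs_cons (c : Char) (t : List Char) (s : Int) :
    pvIdxs (c :: t) s = if c = '\n' then s :: pvIdxs t (s + 1) else pvIdxs t (s + 1) := by
  simp [pvIdxs, PySem.List.enumerate_cons, List.filter_cons]
  by_cases h : c = '\n' <;> simp [h]

theorem length_pvIdxs (cs : List Char) (s : Int) :
    (pvIdxs cs s).length = cs.count '\n' := by
  induction cs generalizing s with
  | nil => rfl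
  | cons c t ih =>
    rw [pvIdxs_cons]
    by_cases h : c = '\n' <;> simp [h, ih]

theorem mem_pvIdxs_ge (cs : List Char) (s : Int) : ∀ x ∈ pvIdxs cs s, s ≤ x := by
  induction cs generalizing s with
  | nil => simp [pvIdxs_nil]
  | cons c t ih =>
    intro x hx
    rw [pvIdxs_cons] at hx
    by_cases h : c = '\n'
    · simp [h] at hx
      rcases hx with rfl | hx
      · omega
      · have := ih (s + 1) x hx; omega
    · simp [h] at hx
      have := ih (s + 1) x hx; omega

theorem count_go_newline : ∀ (fuel : Nat) (l : List Char) (acc : Nat), l.length ≤ fuel →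
    PySem.Chars.count.go ['\n'] fuel l acc = acc + l.count '\n' := by
  intro fuel
  induction fuel with
  | zero =>
    intro l acc h
    have : l = [] := List.eq_nil_of_length_eq_zero (Nat.le_zero.mp h)
    subst this
    simp [PySem.Chars.count.go]
  | succ n ih =>
    intro l acc h
    cases l with
    | nil => simp [PySem.Chars.count.go]
    | cons c t =>
      simp only [PySem.Chars.count.go]
      by_cases hc : c = '\n'
      · subst hc
        have hp : List.isPrefixOf ['\n'] ('\n' :: t) = true := by
          simp [List.isPrefixOf]
        simp only [hp, if_pos, List.length_cons, List.length_nil, List.drop_succ_cons,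
          List.drop_zero]
        rw [ih t (acc + 1) (by simp at h; omega)]
        simp
        omega
      · have hp : List.isPrefixOf ['\n'] (c :: t) = false := by
          simp [List.isPrefixOf]
          intro h'; exact absurd h'.symm hc
        simp only [hp, Bool.false_eq_true, if_neg, not_false_iff]
        rw [ih t acc (by simp at h; omega)]
        simp [hc]

theorem count_newline (cs : List Char) : PySem.Chars.count cs ['\n'] = cs.count '\n' := by
  unfold PySem.Chars.count
  simp only [List.isEmpty_cons, if_neg, Bool.false_eq_true, not_false_iff]
  simpa using count_go_newline cs.length cs 0 (Nat.le_refl _)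

theorem zip_pvW (idxs : List Int) (p : Int) :
    ((p :: idxs.dropLast).zip idxs).map (fun q => q.2 - q.1 - 1) = pvW p idxs := by
  induction idxs generalizing p with
  | nil => rfl
  | cons j r ih =>
    have hsw : ((j :: r).dropLast).zip r = (j :: r.dropLast).zip r := by
      cases r <;> simp
    calc ((p :: (j :: r).dropLast).zip (j :: r)).map (fun q => q.2 - q.1 - 1)
        = (j - p - 1) :: (((j :: r).dropLast).zip r).map (fun q => q.2 - q.1 - 1) := by
          cases r <;> simp
      _ = (j - p - 1) :: ((j :: r.dropLast).zip r).map (fun q => q.2 - q.1 - 1) := by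
          rw [hsw]
      _ = (j - p - 1) :: pvW j r := by rw [ih j]
      _ = pvW p (j :: r) := rfl

theorem foldA_snd (cs : List Char) : ∀ (p lc ml : Int),
    (cs.foldl pvStepA (lc, ml)).2 = List.foldl max ml (pvW p (pvIdxs cs (p + 1 + lc))) := by
  induction cs with
  | nil => intro p lc ml; simp [pvIdxs_nil, pvW]
  | cons c t ih =>
    intro p lc ml
    by_cases hc : c = '\n'
    · subst hc
      rw [List.foldl_cons, show pvStepA (lc, ml) '\n' = (0, max ml lc) from by
        simp [pvStepA]]
      rw [pvIdxs_cons, if_pos rfl]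
      simp only [pvW]
      rw [show p + 1 + lc - p - 1 = lc by omega, List.foldl_cons]
      rw [show p + 1 + lc + 1 = (p + 1 + lc) + 1 + 0 by omega]
      exact ih (p + 1 + lc) 0 (max ml lc)
    · rw [List.foldl_cons, show pvStepA (lc, ml) c = (lc + 1, ml) from by
        simp [pvStepA, hc]]
      rw [pvIdxs_cons, if_neg hc]
      rw [show p + 1 + lc + 1 = p + 1 + (lc + 1) by omega]
      exact ih p (lc + 1) ml

theorem portA_eq (s : String) : determine_image_size_py s =
    if PySem.Str.count s "\n" = 0 then (0, PySem.Str.len s)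
    else ((PySem.Str.count s "\n" : Int), (s.toList.foldl pvStepA (0, 0)).2) := by
  rfl

theorem portB_eq (s : String) : determine_image_size_py_alt s =
    if pvIdxs s.toList 0 = [] then (0, PySem.Str.len s)
    else (((pvIdxs s.toList 0).length : Int),
      (PySem.List.max?
        ((((-1 : Int) :: PySem.List.slice (pvIdxs s.toList 0) none (some (-1))).zip
            (pvIdxs s.toList 0)).map (fun p => p.2 - p.1 - 1)) (fun y => y)).getD 0) := by
  rfl

-- ===== VERDICT =====
theorem determine_image_size_py_spec : Claim_equal_determine_image_size_py := by
  intro output_log _dom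
  unfold Spec_determine_image_size_py
  rw [portA_eq, portB_eq]
  have hcount : PySem.Str.count output_log "\n" = output_log.toList.count '\n' := by
    rw [PySem.Str.count_eq]
    exact count_newline output_log.toList
  have hlen : (pvIdxs output_log.toList 0).length = output_log.toList.count '\n' :=
    length_pvIdxs output_log.toList 0
  by_cases hz : pvIdxs output_log.toList 0 = []
  · have hc : PySem.Str.count output_log "\n" = 0 := by
      rw [hcount, ← hlen, hz]; rfl
    rw [if_pos hc, if_pos hz]
  · have hc : PySem.Str.count output_log "\n" ≠ 0 := by
      rw [hcount, ← hlen]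
      simpa using hz
    rw [if_neg hc, if_neg hz]
    refine Prod.ext ?_ ?_
    · simp only []
      rw [hcount, ← hlen]
    · simp only []
      rw [PySem.List.slice_to_neg_one, zip_pvW]
      obtain ⟨j, r, hjr⟩ : ∃ j r, pvIdxs output_log.toList 0 = j :: r := by
        cases h : pvIdxs output_log.toList 0 with
        | nil => exact absurd h hz
        | cons a b => exact ⟨a, b, rfl⟩
      have hfold := foldA_snd output_log.toList (-1) 0 0
      rw [show (-1 : Int) + 1 + 0 = 0 by omega] at hfold
      rw [hfold, hjr]
      simp only [pvW]
      have hj0 : (0 : Int) ≤ j :=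
        mem_pvIdxs_ge output_log.toList 0 j (by rw [hjr]; exact List.mem_cons_self)
      rw [show j - (-1) - 1 = j by omega]
      have hmax := PySem.List.max?_id_cons (κ := Int) j (pvW j r)
      rw [hmax]
      simp only [Option.getD_some, List.foldl_cons]
      rw [max_eq_right hj0]
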